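-- pv_equiv track=rewrite | github.com/n-iety/findsimilar | findsimilar.py | make_symmetric_moves_list
-- ===== SOURCE A (Python) =====
-- def make_moves(coords):
--     """ Make moves from coodinates (ex. 'pd' -> ';B[pd]') """
--     moves = [";B[" + coords[i] + "]" if (i % 2 == 0)
--                   else ";W[" + coords[i] + "]"
--                   for i in range(len(coords))]
--     return(moves)
--
-- def reverse_position(coord):
--     """ Reverse alphabet position (ex. a -> s, b -> r) """
--     return chr(212 - ord(coord))
--
-- def make_symmetric_moves_list(xy_coords):
--     """
--     8-type variations of moves generated from xy_coords
--     via symmetric operation (rotation, mirror)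
--     """
--     variations = [] # list of 8-type variations
--
--     x_coords = [c[0] for c in xy_coords] # list of x coordinates
--     y_coords = [c[1] for c in xy_coords] # list of y coordinates
--
--     rev_x_coords = list(map(reverse_position, x_coords)) # (-X) 型
--     rev_y_coords = list(map(reverse_position, y_coords)) # (-Y) 型
--
--     x_group = [x_coords, rev_x_coords]
--     y_group = [y_coords, rev_y_coords]
--
--     for coord1 in x_group:
--         for coord2 in y_group:
--             temp = [c1 + c2 for c1, c2 in zip(coord1, coord2)] # XY 型
--             variations.append(make_moves(temp))
--             temp = [c2 + c1 for c1, c2 in zip(coord1, coord2)] # YX 型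
--             variations.append(make_moves(temp))
--
--     return(variations)
-- ===== SOURCE B (Python) =====
-- def make_symmetric_moves_list(xy_coords):
--     """
--     8-type variations of moves generated from xy_coords
--     via symmetric operation (rotation, mirror)
--     Single pass: each coordinate contributes its move to all 8 rows at once,
--     the row index k read as bits (reflect-x, reflect-y, swap).
--     """
--     rows = [[], [], [], [], [], [], [], []]
--     for i, c in enumerate(xy_coords):
--         tag = ";B[" if i % 2 == 0 else ";W["
--         x, y = c[0], c[1]
--         for k in range(8):
--             a = chr(212 - ord(x)) if k & 4 else x
--             b = chr(212 - ord(y)) if k & 2 else y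
--             pair = b + a if k & 1 else a + b
--             rows[k].append(tag + pair + "]")
--     return rows
-- ===== Notes on version B (the rewrite author's own statement) =====
-- stated objective: alternative
-- what changed: Single pass over the input that appends each coordinate's move to all 8 output rows at once (row index decoded as bits reflect-x/reflect-y/swap), instead of A's staged construction of split x/y lists, reversed copies, and nested group loops each re-scanning the input with zip.
import Mathlib
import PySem

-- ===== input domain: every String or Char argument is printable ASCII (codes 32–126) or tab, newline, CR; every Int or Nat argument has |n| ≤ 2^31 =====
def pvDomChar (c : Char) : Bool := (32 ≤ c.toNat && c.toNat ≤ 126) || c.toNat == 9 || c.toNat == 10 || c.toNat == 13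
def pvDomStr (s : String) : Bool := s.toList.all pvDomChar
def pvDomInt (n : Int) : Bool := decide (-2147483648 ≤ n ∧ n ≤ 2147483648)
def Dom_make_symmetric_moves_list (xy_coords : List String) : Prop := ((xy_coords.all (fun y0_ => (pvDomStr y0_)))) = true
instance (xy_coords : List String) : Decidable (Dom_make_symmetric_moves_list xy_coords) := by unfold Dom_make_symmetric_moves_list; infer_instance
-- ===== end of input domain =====

-- B makes a single pass over the input, appending each coordinate's move to all 8 output
-- rows at once (row index decoded as bits reflect-x/reflect-y/swap), instead of A's staged
-- x/y splitting, reversed copies and nested group loops (objective: alternative).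

-- ===== PORT A =====
-- c[0] / c[1] of a Python string: PySem.Str.pyGet? (none = IndexError, excluded by Pre_)
def pvA_get0 (s : String) : Char := (PySem.Str.pyGet? s 0).getD ' '
def pvA_get1 (s : String) : Char := (PySem.Str.pyGet? s 1).getD ' '

def pvA_reverse_position (c : Char) : Char := Char.ofNat (212 - c.toNat)

-- make_moves: comprehension over range(len(coords)); coords[i] with i in range is exact
def pvA_make_moves (coords : List String) : List String :=
  (List.range coords.length).map (fun i =>
    if i % 2 = 0 then ";B[" ++ coords.getD i "" ++ "]"
    else ";W[" ++ coords.getD i "" ++ "]")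

def make_symmetric_moves_list (xy_coords : List String) : List (List String) :=
  let x_coords := xy_coords.map pvA_get0
  let y_coords := xy_coords.map pvA_get1
  let rev_x_coords := x_coords.map pvA_reverse_position
  let rev_y_coords := y_coords.map pvA_reverse_position
  let x_group := [x_coords, rev_x_coords]
  let y_group := [y_coords, rev_y_coords]
  x_group.foldl (fun variations coord1 =>
    y_group.foldl (fun variations coord2 =>
      (variations ++
        [pvA_make_moves (List.zipWith (fun c1 c2 => String.ofList [c1, c2]) coord1 coord2)]) ++
        [pvA_make_moves (List.zipWith (fun c1 c2 => String.ofList [c2, c1]) coord1 coord2)])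
      variations) []

-- ===== PORT B =====
def pvB_rev (c : Char) : Char := Char.ofNat (212 - c.toNat)
def pvB_c0 (s : String) : Char := (PySem.Str.pyGet? s 0).getD ' '
def pvB_c1 (s : String) : Char := (PySem.Str.pyGet? s 1).getD ' '

-- one coordinate's entry for row k: k read as bits (reflect-x, reflect-y, swap)
def pvB_entry (tag : String) (x y : Char) (k : Nat) : String :=
  let a := if k &&& 4 ≠ 0 then pvB_rev x else x
  let b := if k &&& 2 ≠ 0 then pvB_rev y else y
  let pair := if k &&& 1 ≠ 0 then String.ofList [b, a] else String.ofList [a, b]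
  tag ++ pair ++ "]"

-- inner 'for k in range(8): rows[k].append(...)'
def pvB_step (rows : List (List String)) (p : Int × String) : List (List String) :=
  let tag := if p.1 % 2 = 0 then ";B[" else ";W["
  let x := pvB_c0 p.2
  let y := pvB_c1 p.2
  (List.range 8).foldl (fun rows k => rows.set k (rows.getD k [] ++ [pvB_entry tag x y k])) rows

def make_symmetric_moves_list_alt (xy_coords : List String) : List (List String) :=
  (PySem.List.enumerate xy_coords 0).foldl pvB_step [[], [], [], [], [], [], [], []]

-- ===== PRECONDITION & SPEC =====
-- Pre_ excludes inputs containing a string of length < 2: there A's c[1] (or c[0]) raises IndexError (B raises there too).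
def Pre_make_symmetric_moves_list (xy_coords : List String) : Prop :=
  ∀ c ∈ xy_coords, 2 ≤ (PySem.Str.len c)
instance (xy_coords : List String) : Decidable (Pre_make_symmetric_moves_list xy_coords) := by
  unfold Pre_make_symmetric_moves_list; infer_instance

def pvWitness_make_symmetric_moves_list : List String := ["pd", "dp"]

def Spec_make_symmetric_moves_list (xy_coords : List String) (out : List (List String)) : Prop := out = make_symmetric_moves_list_alt xy_coords
instance (xy_coords : List String) (out : List (List String)) : Decidable (Spec_make_symmetric_moves_list xy_coords out) := by unfold Spec_make_symmetric_moves_list; infer_instance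

-- ===== CLAIM =====
def Claim_equal_make_symmetric_moves_list : Prop := ∀ (xy_coords : List String), Dom_make_symmetric_moves_list xy_coords → Pre_make_symmetric_moves_list xy_coords → Spec_make_symmetric_moves_list xy_coords (make_symmetric_moves_list xy_coords)

-- ===== LEMMAS AND PROOFS =====

-- row k of B's result, as a direct map over the enumerated input (proof helper)
def pvB_row (k : Nat) (n : Int) (xs : List String) : List String :=
  (PySem.List.enumerate xs n).map (fun p =>
    pvB_entry (if p.1 % 2 = 0 then ";B[" else ";W[") (pvB_c0 p.2) (pvB_c1 p.2) k)

theorem pvB_row_cons (k : Nat) (n : Int) (x : String) (xs : List String) :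
    pvB_row k n (x :: xs) =
      pvB_entry (if n % 2 = 0 then ";B[" else ";W[") (pvB_c0 x) (pvB_c1 x) k
        :: pvB_row k (n + 1) xs := by
  simp [pvB_row, PySem.List.enumerate_cons]

-- the fold over the enumerated input computes the 8 rows columnwise
theorem pvB_fold_rows (xs : List String) (n : Int)
    (r0 r1 r2 r3 r4 r5 r6 r7 : List String) :
    (PySem.List.enumerate xs n).foldl pvB_step [r0, r1, r2, r3, r4, r5, r6, r7]
      = [r0 ++ pvB_row 0 n xs, r1 ++ pvB_row 1 n xs, r2 ++ pvB_row 2 n xs,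
         r3 ++ pvB_row 3 n xs, r4 ++ pvB_row 4 n xs, r5 ++ pvB_row 5 n xs,
         r6 ++ pvB_row 6 n xs, r7 ++ pvB_row 7 n xs] := by
  induction xs generalizing n r0 r1 r2 r3 r4 r5 r6 r7 with
  | nil => simp [pvB_row, PySem.List.enumerate_nil]
  | cons x xs ih =>
    rw [PySem.List.enumerate_cons, List.foldl_cons]
    show (PySem.List.enumerate xs (n + 1)).foldl pvB_step
        (pvB_step [r0, r1, r2, r3, r4, r5, r6, r7] (n, x)) = _
    have hs : pvB_step [r0, r1, r2, r3, r4, r5, r6, r7] (n, x) =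
        [r0 ++ [pvB_entry (if n % 2 = 0 then ";B[" else ";W[") (pvB_c0 x) (pvB_c1 x) 0],
         r1 ++ [pvB_entry (if n % 2 = 0 then ";B[" else ";W[") (pvB_c0 x) (pvB_c1 x) 1],
         r2 ++ [pvB_entry (if n % 2 = 0 then ";B[" else ";W[") (pvB_c0 x) (pvB_c1 x) 2],
         r3 ++ [pvB_entry (if n % 2 = 0 then ";B[" else ";W[") (pvB_c0 x) (pvB_c1 x) 3],
         r4 ++ [pvB_entry (if n % 2 = 0 then ";B[" else ";W[") (pvB_c0 x) (pvB_c1 x) 4],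
         r5 ++ [pvB_entry (if n % 2 = 0 then ";B[" else ";W[") (pvB_c0 x) (pvB_c1 x) 5],
         r6 ++ [pvB_entry (if n % 2 = 0 then ";B[" else ";W[") (pvB_c0 x) (pvB_c1 x) 6],
         r7 ++ [pvB_entry (if n % 2 = 0 then ";B[" else ";W[") (pvB_c0 x) (pvB_c1 x) 7]] := by
      simp [pvB_step, List.range_succ]
    rw [hs, ih]
    simp [pvB_row_cons, List.append_assoc]

-- A's range/index move builder as a map over the enumerated coords
theorem pvA_make_moves_enum (coords : List String) :
    pvA_make_moves coords = (PySem.List.enumerate coords 0).map (fun p =>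
      (if p.1 % 2 = 0 then ";B[" else ";W[") ++ p.2 ++ "]") := by
  apply List.ext_getElem
  · simp [pvA_make_moves, PySem.List.length_enumerate]
  · intro k h1 h2
    simp only [pvA_make_moves, List.getElem_map, List.getElem_range,
      PySem.List.getElem_enumerate]
    have hk : k < coords.length := by simpa [pvA_make_moves] using h1
    rw [List.getD_eq_getElem _ _ hk]
    by_cases hp : k % 2 = 0
    · simp [hp]; omega
    · simp [hp]; omega

-- zipWith of two maps over the same list is one map
theorem pv_zip_maps (f g : String → Char) (mk : Char → Char → String) (xs : List String) :
    List.zipWith (fun c1 c2 => mk c1 c2) (xs.map f) (xs.map g)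
      = xs.map (fun c => mk (f c) (g c)) := by
  induction xs with
  | nil => rfl
  | cons x xs ih => simp [ih]

-- enumerate of a mapped list is the mapped enumerate
theorem pv_enumerate_map (f : String → String) (xs : List String) (n : Int) :
    PySem.List.enumerate (xs.map f) n
      = (PySem.List.enumerate xs n).map (fun p => (p.1, f p.2)) := by
  induction xs generalizing n with
  | nil => simp [PySem.List.enumerate_nil]
  | cons x xs ih => simp [PySem.List.enumerate_cons, ih]

-- B's row k equals pvA_make_moves applied to the map by any transform that agrees with entry k
theorem pvB_row_eq_make_moves (k : Nat) (t : String → String)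
    (ht : ∀ tag s, pvB_entry tag (pvB_c0 s) (pvB_c1 s) k = tag ++ t s ++ "]")
    (xs : List String) :
    pvB_row k 0 xs = pvA_make_moves (xs.map t) := by
  rw [pvA_make_moves_enum, pv_enumerate_map, List.map_map, pvB_row]
  apply List.map_congr_left
  intro p _
  exact ht _ _

-- ===== VERDICT =====
theorem make_symmetric_moves_list_spec : Claim_equal_make_symmetric_moves_list := by
  intro xy _ _
  show make_symmetric_moves_list xy = make_symmetric_moves_list_alt xy
  rw [make_symmetric_moves_list_alt, pvB_fold_rows]
  simp only [List.nil_append]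
  have e0 := pvB_row_eq_make_moves 0 (fun c => String.ofList [pvA_get0 c, pvA_get1 c])
    (by intro tag s; simp [pvB_entry, pvB_c0, pvB_c1, pvA_get0, pvA_get1]) xy
  have e1 := pvB_row_eq_make_moves 1 (fun c => String.ofList [pvA_get1 c, pvA_get0 c])
    (by intro tag s; simp [pvB_entry, pvB_c0, pvB_c1, pvA_get0, pvA_get1]) xy
  have e2 := pvB_row_eq_make_moves 2
    (fun c => String.ofList [pvA_get0 c, pvA_reverse_position (pvA_get1 c)])
    (by intro tag s; simp [pvB_entry, pvB_c0, pvB_c1, pvB_rev, pvA_get0, pvA_get1, pvA_reverse_position]) xy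
  have e3 := pvB_row_eq_make_moves 3
    (fun c => String.ofList [pvA_reverse_position (pvA_get1 c), pvA_get0 c])
    (by intro tag s; simp [pvB_entry, pvB_c0, pvB_c1, pvB_rev, pvA_get0, pvA_get1, pvA_reverse_position]) xy
  have e4 := pvB_row_eq_make_moves 4
    (fun c => String.ofList [pvA_reverse_position (pvA_get0 c), pvA_get1 c])
    (by intro tag s; simp [pvB_entry, pvB_c0, pvB_c1, pvB_rev, pvA_get0, pvA_get1, pvA_reverse_position]) xy
  have e5 := pvB_row_eq_make_moves 5
    (fun c => String.ofList [pvA_get1 c, pvA_reverse_position (pvA_get0 c)])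
    (by intro tag s; simp [pvB_entry, pvB_c0, pvB_c1, pvB_rev, pvA_get0, pvA_get1, pvA_reverse_position]) xy
  have e6 := pvB_row_eq_make_moves 6
    (fun c => String.ofList [pvA_reverse_position (pvA_get0 c), pvA_reverse_position (pvA_get1 c)])
    (by intro tag s; simp [pvB_entry, pvB_c0, pvB_c1, pvB_rev, pvA_get0, pvA_get1, pvA_reverse_position]) xy
  have e7 := pvB_row_eq_make_moves 7
    (fun c => String.ofList [pvA_reverse_position (pvA_get1 c), pvA_reverse_position (pvA_get0 c)])
    (by intro tag s; simp [pvB_entry, pvB_c0, pvB_c1, pvB_rev, pvA_get0, pvA_get1, pvA_reverse_position]) xy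
  rw [e0, e1, e2, e3, e4, e5, e6, e7]
  simp only [make_symmetric_moves_list, List.foldl, List.map_map, pv_zip_maps,
    List.nil_append, List.append_assoc]
  rfl
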